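-- pv_equiv track=rewrite | github.com/viswaamitcodes/Become_coder_python | leastrepeatedval.py | leastrepeatedval
-- ===== SOURCE A (Python) =====
-- def leastrepeatedval(n,data):
--     li1=[]
--     li3=[]
--     for i in data:
--        li1.append(data.count(i))
--     num=min(li1)
--     for i in data:
--         if data.count(i)==num:
--             if i not in li3:
--                 li3.append(i)
--     return li3
-- ===== SOURCE B (Python) =====
-- def leastrepeatedval(n, data):
--     freq = {}
--     for v in data:
--         freq[v] = freq.get(v, 0) + 1
--     m = min(freq.values())
--     return [k for k in freq if freq[k] == m]
-- ===== Notes on version B (the rewrite author's own statement) =====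
-- stated objective: faster
-- what changed: Replaces A's repeated data.count scans (a count per element in both passes) by one frequency dictionary built in a single pass; the result is collected from the dict's keys in insertion (first-appearance) order, so no re-scan of data and no membership test on the output list is needed.
import Mathlib
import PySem

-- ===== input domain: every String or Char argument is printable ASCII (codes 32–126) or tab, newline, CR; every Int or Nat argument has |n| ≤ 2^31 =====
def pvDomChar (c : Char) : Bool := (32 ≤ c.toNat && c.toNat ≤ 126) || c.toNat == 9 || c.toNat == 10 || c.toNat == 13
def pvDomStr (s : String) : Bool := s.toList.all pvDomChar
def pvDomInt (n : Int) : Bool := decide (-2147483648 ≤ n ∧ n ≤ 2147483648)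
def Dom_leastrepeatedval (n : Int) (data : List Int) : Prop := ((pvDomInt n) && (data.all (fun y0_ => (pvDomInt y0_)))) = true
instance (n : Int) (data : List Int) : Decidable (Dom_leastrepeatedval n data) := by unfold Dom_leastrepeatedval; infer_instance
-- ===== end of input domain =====

-- B builds one frequency dictionary instead of A's repeated data.count scans; equivalence of return values on nonempty data (A raises ValueError on empty data).


-- ===== PORT A =====
-- li1 is the first loop's list of counts; num = min(li1); the second loop re-counts and dedups.
def leastrepeatedval (_n : Int) (data : List Int) : List Int :=
  match PySem.List.min?
      (data.foldl (fun acc i => acc ++ [(PySem.List.count data i : Int)]) [])  -- li1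
      (fun x => x) with
  | none => []   -- unreachable under Pre_: Python's min([]) raises ValueError
  | some num =>
      data.foldl (fun li3 i =>
        if (PySem.List.count data i : Int) == num then
          if li3.contains i then li3 else li3 ++ [i]
        else li3) []

-- ===== PORT B =====
-- freq, the dict built by the loop 'freq[v] = freq.get(v, 0) + 1' (a named helper for the local variable)
def bFreq (data : List Int) : PySem.Dict Int Int :=
  data.foldl (fun d v => d.insert v (d.getD v 0 + 1)) PySem.Dict.empty

def leastrepeatedval_alt (_n : Int) (data : List Int) : List Int :=
  match PySem.List.min? (bFreq data).values (fun x => x) with   -- m = min(freq.values())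
  | none => []   -- unreachable under Pre_: Python's min of an empty dict's values raises ValueError
  | some m =>
      -- freq[k] for k iterated over freq's keys: the key is present, so getD 0 = the stored value
      (bFreq data).keys.filter (fun k => (bFreq data).getD k 0 == m)

-- ===== PRECONDITION & SPEC =====
-- Pre_ excludes only the empty list, on which both A and B raise ValueError (min of an empty sequence).
def Pre_leastrepeatedval (n : Int) (data : List Int) : Prop := data ≠ []
instance (n : Int) (data : List Int) : Decidable (Pre_leastrepeatedval n data) := by unfold Pre_leastrepeatedval; infer_instance
def pvWitness_leastrepeatedval : Int × List Int := (0, [1, 2, 2, 3])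

def Spec_leastrepeatedval (n : Int) (data : List Int) (out : List Int) : Prop := out = leastrepeatedval_alt n data
instance (n : Int) (data : List Int) (out : List Int) : Decidable (Spec_leastrepeatedval n data out) := by unfold Spec_leastrepeatedval; infer_instance

-- ===== CLAIM (what is proved, stated in full; the proofs are below) =====
def Claim_equal_leastrepeatedval : Prop := ∀ (n : Int) (data : List Int), Dom_leastrepeatedval n data → Pre_leastrepeatedval n data → Spec_leastrepeatedval n data (leastrepeatedval n data)

-- ===== LEMMAS AND PROOFS =====

-- filter commutes with Set.add
lemma filter_set_add (p : Int → Bool) (s : PySem.Set Int) (x : Int) :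
    (PySem.Set.add s x).filter p = if p x then PySem.Set.add (s.filter p) x else s.filter p := by
  by_cases hx : x ∈ s
  · by_cases hp : p x = true
    · simp [PySem.Set.add, PySem.Set.contains, hx, hp]
    · simp [PySem.Set.add, PySem.Set.contains, hx, hp]
  · by_cases hp : p x = true
    · simp [PySem.Set.add, PySem.Set.contains, hx, hp, List.filter_append]
    · simp [PySem.Set.add, PySem.Set.contains, hx, hp, List.filter_append]

-- filter commutes with Set.ofList (first-occurrence dedup)
lemma filter_set_ofList (p : Int → Bool) (l : List Int) :
    (PySem.Set.ofList l).filter p = PySem.Set.ofList (l.filter p) := by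
  induction l using List.reverseRecOn with
  | nil => simp [PySem.Set.ofList, PySem.Set.empty]
  | append_singleton l x ih =>
      have h1 : ∀ (m : List Int), PySem.Set.ofList (m ++ [x]) = PySem.Set.add (PySem.Set.ofList m) x := by
        intro m; simp [PySem.Set.ofList, List.foldl_append]
      by_cases hp : p x = true
      · rw [h1, filter_set_add, if_pos hp, ih, List.filter_append,
            show List.filter p [x] = [x] by simp [hp], h1]
      · rw [h1, filter_set_add, if_neg (by simp [hp]), ih, List.filter_append,
            show List.filter p [x] = [] by simp [hp], List.append_nil]

-- min? with the identity key depends only on which values occur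
lemma min?_id_eq_of_mem_iff (l1 l2 : List Int) (h : ∀ x, x ∈ l1 ↔ x ∈ l2)
    (hne : l1 ≠ []) :
    PySem.List.min? l1 (fun x => x) = PySem.List.min? l2 (fun x => x) := by
  have hne2 : l2 ≠ [] := by
    cases l1 with
    | nil => exact absurd rfl hne
    | cons a t =>
        intro h2
        have := (h a).mp List.mem_cons_self
        simp [h2] at this
  obtain ⟨m1, hm1⟩ := Option.ne_none_iff_exists'.mp
    (by simpa [PySem.List.min?_eq_none_iff] using hne : PySem.List.min? l1 (fun x => x) ≠ none)
  obtain ⟨m2, hm2⟩ := Option.ne_none_iff_exists'.mp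
    (by simpa [PySem.List.min?_eq_none_iff] using hne2 : PySem.List.min? l2 (fun x => x) ≠ none)
  have mem1 : m1 ∈ l1 := PySem.List.min?_mem hm1
  have mem2 : m2 ∈ l2 := PySem.List.min?_mem hm2
  have le12 : m1 ≤ m2 := PySem.List.min?_isMin hm1 m2 ((h m2).mpr mem2)
  have le21 : m2 ≤ m1 := PySem.List.min?_isMin hm2 m1 ((h m1).mp mem1)
  rw [hm1, hm2, le_antisymm le12 le21]

theorem leastrepeatedval_spec : Claim_equal_leastrepeatedval := by
  intro n data _ hpre
  unfold Spec_leastrepeatedval leastrepeatedval leastrepeatedval_alt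
  have hfreq : bFreq data = PySem.Dict.counter data :=
    PySem.Dict.foldl_insert_getD_add_one_eq_counter data
  rw [hfreq]
  have hli1 : data.foldl (fun acc i => acc ++ [(PySem.List.count data i : Int)]) ([] : List Int)
      = data.map (fun i => (PySem.List.count data i : Int)) := by
    simpa using PySem.List.foldl_append_singleton_eq_map
      (l := data) (f := fun i => (PySem.List.count data i : Int)) (acc := [])
  rw [hli1]
  have hvals : (PySem.Dict.counter data).values
      = (PySem.Set.ofList data).map (fun k => (List.count k data : Int)) := by
    have hic := PySem.Dict.items_counter (xs := data)
    simp only [PySem.Dict.values, hic, List.map_map]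
    rfl
  have hmin : PySem.List.min? (data.map (fun i => (PySem.List.count data i : Int))) (fun x => x)
      = PySem.List.min? ((PySem.Dict.counter data).values) (fun x => x) := by
    rw [hvals]
    apply min?_id_eq_of_mem_iff
    · intro x
      constructor
      · intro hx
        obtain ⟨i, hi, hxi⟩ := List.mem_map.mp hx
        exact List.mem_map.mpr ⟨i, (PySem.Set.mem_ofList _ _).mpr hi,
          by simpa [PySem.List.count_eq] using hxi⟩
      · intro hx
        obtain ⟨i, hi, hxi⟩ := List.mem_map.mp hx
        exact List.mem_map.mpr ⟨i, (PySem.Set.mem_ofList _ _).mp hi,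
          by simpa [PySem.List.count_eq] using hxi⟩
    · simpa using hpre
  rw [hmin]
  cases hmv : PySem.List.min? ((PySem.Dict.counter data).values) (fun x => x) with
  | none => rfl
  | some m =>
      simp only
      have hkeys : (PySem.Dict.counter data).keys = PySem.Set.ofList data :=
        PySem.Dict.keys_counter data
      have hloop : data.foldl (fun li3 i =>
            if (PySem.List.count data i : Int) == m then
              if li3.contains i then li3 else li3 ++ [i]
            else li3) []
          = (data.filter (fun i => (PySem.List.count data i : Int) == m)).foldl
              (fun li3 i => if li3.contains i then li3 else li3 ++ [i]) [] :=
        PySem.List.foldl_if_eq_foldl_filter _ _ _ _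
      rw [hloop]
      have hset : (data.filter (fun i => (PySem.List.count data i : Int) == m)).foldl
            (fun li3 i => if li3.contains i then li3 else li3 ++ [i]) []
          = PySem.Set.ofList (data.filter (fun i => (PySem.List.count data i : Int) == m)) := by
        rw [show PySem.Set.ofList (data.filter (fun i => (PySem.List.count data i : Int) == m))
              = (data.filter (fun i => (PySem.List.count data i : Int) == m)).foldl
                  PySem.Set.add PySem.Set.empty from rfl]
        apply PySem.List.foldl_congr_mem
        intro acc x _
        simp [PySem.Set.add, PySem.Set.contains]
      rw [hset, ← filter_set_ofList, hkeys]
      apply List.filter_congr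
      intro k _
      simp [PySem.Dict.getD_counter, PySem.List.count_eq]
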